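-- pv_equiv track=rewrite | github.com/edgeemer/genome-assembly | Scripts/consensus_generator/consensus_generator.py | start_and_end_positions
-- ===== SOURCE A (Python) =====
-- def start_and_end_positions(sequences, primary_name):
--     start, end, length = 0, 0, 0
--
--     for header, sequence in sequences.items():
--         if header == primary_name:
--             length = len(sequence)
--             for index, char in enumerate(sequence):
--                 if char != '-':
--                     start = index
--                     break
--             for index, char in enumerate(reversed(sequence)):
--                 if char != '-':
--                     end = index
--                     break
--
--             for index, char in enumerate(reversed(sequence)):
--                 if char != '-':
--                     if index < end:
--                         end = index
--                     break
--
--     end = length - end - 1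
--     return start, end
-- ===== SOURCE B (Python) =====
-- def start_and_end_positions(sequences, primary_name):
--     if primary_name not in sequences:
--         return 0, -1
--     sequence = sequences[primary_name]
--     start, end = 0, len(sequence) - 1
--     seen = False
--     for index, char in enumerate(sequence):
--         if char != '-':
--             if not seen:
--                 start = index
--                 seen = True
--             end = index
--     return start, end
-- ===== Notes on version B (the rewrite author's own statement) =====
-- stated objective: simpler
-- what changed: Replaces A's items() loop with a forward scan plus two reverse enumerate scans and a final length arithmetic by a direct dict lookup and one single forward pass that tracks both the first and the last non-dash index, with defaults chosen so empty/missing/all-dash sequences give the same (0,-1)/(0,length-1).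
import Mathlib
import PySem

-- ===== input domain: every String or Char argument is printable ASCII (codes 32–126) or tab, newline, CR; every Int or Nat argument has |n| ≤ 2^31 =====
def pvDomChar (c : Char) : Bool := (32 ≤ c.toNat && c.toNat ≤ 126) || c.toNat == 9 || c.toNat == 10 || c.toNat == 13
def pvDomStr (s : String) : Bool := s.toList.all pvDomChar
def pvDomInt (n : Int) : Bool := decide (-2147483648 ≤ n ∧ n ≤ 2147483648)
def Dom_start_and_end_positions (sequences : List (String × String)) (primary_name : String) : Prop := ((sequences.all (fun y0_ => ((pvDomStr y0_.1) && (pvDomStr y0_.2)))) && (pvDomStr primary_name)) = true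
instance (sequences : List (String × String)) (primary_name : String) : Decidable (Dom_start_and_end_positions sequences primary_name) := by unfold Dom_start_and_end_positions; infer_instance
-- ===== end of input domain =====

-- B replaces A's forward scan plus two reverse scans and a final length subtraction by one
-- forward pass tracking both the first and the last non-dash index (objective: simpler).

-- ===== PORT A =====
-- 'for index, char in enumerate(seq): if char != '-': <set>; break' — first index with char ≠ '-'
def findNonDash : List Char → Int → Option Int
  | [], _ => none
  | c :: cs, i => if c != '-' then some i else findNonDash cs (i + 1)

-- one iteration of A's 'for header, sequence in sequences.items()' loop, state (start, end, length)
def stepA (primary_name : String) (st : Int × Int × Int) (hs : String × String) : Int × Int × Int :=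
  if hs.1 == primary_name then
    let cs := hs.2.toList
    let length : Int := cs.length
    let start : Int := match findNonDash cs 0 with | some i => i | none => st.1
    let e1 : Int := match findNonDash cs.reverse 0 with | some i => i | none => st.2.1
    let e2 : Int := match findNonDash cs.reverse 0 with
      | some i => if i < e1 then i else e1
      | none => e1
    (start, e2, length)
  else st

def start_and_end_positions (sequences : List (String × String)) (primary_name : String) : Int × Int :=
  let st := sequences.foldl (stepA primary_name) (0, 0, 0)
  (st.1, st.2.2 - st.2.1 - 1)

-- ===== PORT B =====
-- Python dict lookup / 'in' test: exact because a dict built from these pairs keeps,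
-- for each key, the value of its LAST pair (later pairs overwrite earlier ones).
def lookupLast (sequences : List (String × String)) (k : String) : Option String :=
  sequences.foldl (fun acc hs => if hs.1 == k then some hs.2 else acc) none

-- Source B's single 'for index, char in enumerate(sequence)' pass, state (start, end, seen)
def scanB : List Char → Int → Int × Int × Bool → Int × Int × Bool
  | [], _, st => st
  | c :: cs, i, st =>
    scanB cs (i + 1)
      (if c != '-' then ((if !st.2.2 then i else st.1), i, true) else st)

def start_and_end_positions_alt (sequences : List (String × String)) (primary_name : String) : Int × Int :=
  match lookupLast sequences primary_name with
  | none => (0, -1)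
  | some sequence =>
    let cs := sequence.toList
    let st := scanB cs 0 (0, (cs.length : Int) - 1, false)
    (st.1, st.2.1)

-- ===== PRECONDITION & SPEC =====
-- Pre_ excludes association lists carrying more than one entry keyed primary_name: such lists
-- cannot arise from a Python dict (duplicate keys collapse), and on them A's result may keep
-- leftover loop state from an earlier duplicate, which is accidental.
def Pre_start_and_end_positions (sequences : List (String × String)) (primary_name : String) : Prop :=
  sequences.countP (fun p => p.1.toList == primary_name.toList) ≤ 1

instance (sequences : List (String × String)) (primary_name : String) : Decidable (Pre_start_and_end_positions sequences primary_name) := by unfold Pre_start_and_end_positions; infer_instance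

def pvWitness_start_and_end_positions : (List (String × String)) × String := ([("seq1", "--AC-A--"), ("seq2", "GGGG")], "seq1")

def Spec_start_and_end_positions (sequences : List (String × String)) (primary_name : String) (out : Int × Int) : Prop := out = start_and_end_positions_alt sequences primary_name
instance (sequences : List (String × String)) (primary_name : String) (out : Int × Int) : Decidable (Spec_start_and_end_positions sequences primary_name out) := by unfold Spec_start_and_end_positions; infer_instance

-- ===== CLAIM (what is proved, stated in full; the proofs are below) =====
def Claim_equal_start_and_end_positions : Prop := ∀ (sequences : List (String × String)) (primary_name : String), Dom_start_and_end_positions sequences primary_name → Pre_start_and_end_positions sequences primary_name → Spec_start_and_end_positions sequences primary_name (start_and_end_positions sequences primary_name)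

-- ===== LEMMAS AND PROOFS =====

-- String (==) agrees with (==) on the character lists (Pre_ is stated on toList so it decides fast)
lemma stringBeq (s t : String) : (s == t) = (s.toList == t.toList) := by
  by_cases h : s = t
  · simp [h]
  · have h2 : s.toList ≠ t.toList := fun he => h (String.toList_inj.mp he)
    simp [h, h2]

lemma countP_beq_toList (seqs : List (String × String)) (pn : String) :
    seqs.countP (fun p => p.1 == pn) = seqs.countP (fun p => p.1.toList == pn.toList) :=
  List.countP_congr (fun a _ => by rw [stringBeq a.1 pn])

-- findNonDash is findIdx? (· != '-') shifted by the running counter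
lemma findNonDash_eq (cs : List Char) : ∀ i : Int,
    findNonDash cs i = (cs.findIdx? (fun c => c != '-')).map (fun n => i + (n : Int)) := by
  induction cs with
  | nil => intro i; rfl
  | cons c cs ih =>
    intro i
    by_cases h : (c != '-') = true
    · simp [findNonDash, h, List.findIdx?_cons]
    · simp only [findNonDash, h, List.findIdx?_cons, ih (i + 1)]
      cases h2 : cs.findIdx? (fun c => c != '-') with
      | none => simp
      | some n => simp; ring

-- if a list has no non-dash character, neither does its reverse
lemma revNone (cs : List Char) (hf : cs.findIdx? (fun c => c != '-') = none) :
    cs.reverse.findIdx? (fun c => c != '-') = none := by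
  rw [List.findIdx?_eq_none_iff] at hf ⊢
  intro x hx; exact hf x (by simpa using hx)

-- if a list has a non-dash character, its reverse finds one at an in-range index
lemma revSome (cs : List Char) (f : Nat) (hf : cs.findIdx? (fun c => c != '-') = some f) :
    ∃ r, cs.reverse.findIdx? (fun c => c != '-') = some r ∧ r < cs.length := by
  rcases hr : cs.reverse.findIdx? (fun c => c != '-') with _ | r
  · exfalso
    rw [List.findIdx?_eq_none_iff] at hr
    obtain ⟨hlt, hp, -⟩ := List.findIdx?_eq_some_iff_getElem.mp hf
    exact absurd (hr cs[f] (by simp)) (by simp [hp])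
  · obtain ⟨hlt, -, -⟩ := List.findIdx?_eq_some_iff_getElem.mp hr
    exact ⟨r, rfl, by simpa using hlt⟩

-- the single pass of B, characterised by the first/last non-dash indices
lemma scanB_eq (cs : List Char) : ∀ (i s e : Int) (seen : Bool),
    scanB cs i (s, e, seen) =
      match cs.findIdx? (fun c => c != '-') with
      | none => (s, e, seen)
      | some f =>
        ((if seen then s else i + (f : Int)),
         i + ((cs.length : Int) - 1 - (((cs.reverse.findIdx? (fun c => c != '-')).getD 0 : Nat) : Int)),
         true) := by
  induction cs with
  | nil => intro i s e seen; rfl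
  | cons c cs ih =>
    intro i s e seen
    have hrev : (c :: cs).reverse = cs.reverse ++ [c] := by simp
    by_cases h : (c != '-') = true
    · rcases hf : cs.findIdx? (fun c => c != '-') with _ | f
      · have hrn := revNone cs hf
        have h1 : (c :: cs).findIdx? (fun c => c != '-') = some 0 := by
          rw [List.findIdx?_cons]; simp [h]
        have h2 : (c :: cs).reverse.findIdx? (fun c => c != '-') = some cs.length := by
          rw [hrev, List.findIdx?_append, hrn]
          simp [List.findIdx?_cons, h]
        simp only [scanB, h, if_true, ih, hf, h1, h2]
        cases seen <;> simp
      · obtain ⟨r, hr, hrlt⟩ := revSome cs f hf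
        have h1 : (c :: cs).findIdx? (fun c => c != '-') = some 0 := by
          rw [List.findIdx?_cons]; simp [h]
        have h2 : (c :: cs).reverse.findIdx? (fun c => c != '-') = some r := by
          rw [hrev, List.findIdx?_append, hr]; rfl
        simp only [scanB, h, if_true, ih, hf, hr, h1, h2]
        cases seen <;> simp <;> omega
    · have hb : (c != '-') = false := by simpa using h
      rcases hf : cs.findIdx? (fun c => c != '-') with _ | f
      · have h1 : (c :: cs).findIdx? (fun c => c != '-') = none := by
          rw [List.findIdx?_cons]; simp [hb, hf]
        simp [scanB, hb, ih, hf, h1]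
      · obtain ⟨r, hr, hrlt⟩ := revSome cs f hf
        have h1 : (c :: cs).findIdx? (fun c => c != '-') = some (f + 1) := by
          rw [List.findIdx?_cons]; simp [hb, hf]
        have h2 : (c :: cs).reverse.findIdx? (fun c => c != '-') = some r := by
          rw [hrev, List.findIdx?_append, hr]; rfl
        simp only [scanB, hb, ih, hf, hr, h1, h2]
        cases seen <;> simp <;> omega

-- a fold over entries none of which match leaves the state unchanged (A's loop)
lemma foldA_noMatch (pn : String) (t : List (String × String))
    (h : t.countP (fun p => p.1 == pn) = 0) (st : Int × Int × Int) :
    t.foldl (stepA pn) st = st := by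
  induction t generalizing st with
  | nil => rfl
  | cons x t ih =>
    rw [List.countP_cons] at h
    have hx : (x.1 == pn) = false := by
      by_cases hb : (x.1 == pn) = true
      · simp [hb] at h
      · simpa using hb
    have : stepA pn st x = st := by simp [stepA, hx]
    rw [List.foldl_cons, this, ih (by omega)]

-- likewise for B's lookup fold
lemma lookupLast_noMatch (pn : String) (t : List (String × String))
    (h : t.countP (fun p => p.1 == pn) = 0) (acc : Option String) :
    t.foldl (fun acc hs => if hs.1 == pn then some hs.2 else acc) acc = acc := by
  induction t generalizing acc with
  | nil => rfl
  | cons x t ih =>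
    rw [List.countP_cons] at h
    have hx : (x.1 == pn) = false := by
      by_cases hb : (x.1 == pn) = true
      · simp [hb] at h
      · simpa using hb
    rw [List.foldl_cons]
    simp only [hx, Bool.false_eq_true, if_false]
    exact ih (by omega) acc

-- with at most one matching entry, A's fold is the single step at the looked-up value
lemma foldA_eq_lookup (pn : String) (seqs : List (String × String))
    (h : seqs.countP (fun p => p.1 == pn) ≤ 1) :
    seqs.foldl (stepA pn) (0, 0, 0) =
      match lookupLast seqs pn with
      | none => (0, 0, 0)
      | some v => stepA pn (0, 0, 0) (pn, v) := by
  induction seqs with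
  | nil => rfl
  | cons x t ih =>
    rw [List.countP_cons] at h
    by_cases hx : (x.1 == pn) = true
    · have ht : t.countP (fun p => p.1 == pn) = 0 := by
        have h1 : (if (x.1 == pn) = true then (1 : Nat) else 0) = 1 := by simp [hx]
        omega
      have hv : x.1 = pn := by simpa using hx
      rw [List.foldl_cons, foldA_noMatch pn t ht]
      have hl : lookupLast (x :: t) pn = some x.2 := by
        unfold lookupLast
        rw [List.foldl_cons]
        simp only [hx]
        exact lookupLast_noMatch pn t ht _
      rw [hl]
      simp [stepA, hv]
    · have hxf : (x.1 == pn) = false := by simpa using hx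
      have hst : stepA pn (0, 0, 0) x = (0, 0, 0) := by simp [stepA, hxf]
      have hl : lookupLast (x :: t) pn = lookupLast t pn := by
        unfold lookupLast; rw [List.foldl_cons]; simp [hxf]
      rw [List.foldl_cons, hst, hl]
      exact ih (le_trans (Nat.le_add_right _ _) h)

-- ===== VERDICT (by name: the statement is the Claim_ definition above) =====
theorem start_and_end_positions_spec : Claim_equal_start_and_end_positions := by
  intro seqs pn _ hpre
  have hpre' : seqs.countP (fun p => p.1 == pn) ≤ 1 := by
    rw [countP_beq_toList]; exact hpre
  unfold Spec_start_and_end_positions start_and_end_positions start_and_end_positions_alt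
  rw [foldA_eq_lookup pn seqs hpre']
  rcases hl : lookupLast seqs pn with _ | v
  · simp
  · simp only
    rw [scanB_eq]
    unfold stepA
    simp only [BEq.rfl]
    rw [findNonDash_eq v.toList 0, findNonDash_eq v.toList.reverse 0]
    rcases hf : v.toList.findIdx? (fun c => c != '-') with _ | f
    · have hrn := revNone v.toList hf
      simp [hrn]
    · obtain ⟨r, hr, -⟩ := revSome v.toList f hf
      simp [hr]
      omega
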